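-- pv_equiv track=rewrite | github.com/kmyk/cpp-auto-include | a.py | order_lines
-- ===== SOURCE A (Python) =====
-- def order_lines(xs):
--     include = []
--     define = []
--     using_namespace = []
--     other = []
--     for x in xs:
--         if x.startswith('#include'):
--             include += [ x ]
--         elif x.startswith('#define'):
--             define += [ x ]
--         elif x.startswith('using namespace '):
--             using_namespace += [ x ]
--         else:
--             other += [ x ]
--     return include + define + using_namespace + other
-- ===== SOURCE B (Python) =====
-- def order_lines(xs):
--     def rank(x):
--         if x.startswith('#include'):
--             return 0
--         if x.startswith('#define'):
--             return 1
--         if x.startswith('using namespace '):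
--             return 2
--         return 3
--     return sorted(xs, key=rank)
-- ===== Notes on version B (the rewrite author's own statement) =====
-- stated objective: alternative
-- what changed: Replaces the four explicit buckets and final concatenation with a single stable sort by a prefix-rank key (0 include, 1 define, 2 using-namespace, 3 other), relying on sort stability to preserve relative order within each group.
import Mathlib
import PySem

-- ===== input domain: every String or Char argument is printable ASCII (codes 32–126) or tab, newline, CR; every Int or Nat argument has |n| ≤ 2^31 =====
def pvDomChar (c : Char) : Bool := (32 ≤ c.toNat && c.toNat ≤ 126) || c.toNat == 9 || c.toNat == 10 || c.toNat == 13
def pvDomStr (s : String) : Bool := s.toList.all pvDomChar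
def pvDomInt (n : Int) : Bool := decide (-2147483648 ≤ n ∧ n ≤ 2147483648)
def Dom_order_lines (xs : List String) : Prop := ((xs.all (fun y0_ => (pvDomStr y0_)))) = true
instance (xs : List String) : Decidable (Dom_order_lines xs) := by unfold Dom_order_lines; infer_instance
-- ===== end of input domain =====

-- B replaces A's four explicit buckets with a single stable sort by a prefix-rank key (alternative decomposition, same result).

-- ===== PORT A =====
-- the loop body: one step of A's for-loop over the four accumulator lists
def olStep (st : List String × List String × List String × List String) (x : String) :
    List String × List String × List String × List String :=
  if PySem.Str.startswith x "#include" then (st.1 ++ [x], st.2.1, st.2.2.1, st.2.2.2)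
  else if PySem.Str.startswith x "#define" then (st.1, st.2.1 ++ [x], st.2.2.1, st.2.2.2)
  else if PySem.Str.startswith x "using namespace " then (st.1, st.2.1, st.2.2.1 ++ [x], st.2.2.2)
  else (st.1, st.2.1, st.2.2.1, st.2.2.2 ++ [x])

def order_lines (xs : List String) : List String :=
  let st := xs.foldl olStep ([], [], [], [])
  st.1 ++ st.2.1 ++ st.2.2.1 ++ st.2.2.2

-- ===== PORT B =====
-- B's rank key
def olRank (x : String) : Int :=
  if PySem.Str.startswith x "#include" then 0
  else if PySem.Str.startswith x "#define" then 1
  else if PySem.Str.startswith x "using namespace " then 2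
  else 3

def order_lines_alt (xs : List String) : List String :=
  PySem.List.sorted xs olRank false

-- ===== PRECONDITION & SPEC =====
def Spec_order_lines (xs : List String) (out : List String) : Prop := out = order_lines_alt xs
instance (xs : List String) (out : List String) : Decidable (Spec_order_lines xs out) := by unfold Spec_order_lines; infer_instance

-- ===== CLAIM (what is proved, stated in full; the proofs are below) =====
def Claim_equal_order_lines : Prop := ∀ (xs : List String), Dom_order_lines xs → Spec_order_lines xs (order_lines xs)

-- ===== LEMMAS AND PROOFS =====

-- the rank-i bucket of xs, as a filter
def olBucket (i : Int) (xs : List String) : List String :=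
  xs.filter (fun s => olRank s = i)

theorem olRank_mem_bucket {i : Int} {xs : List String} {y : String}
    (h : y ∈ olBucket i xs) : olRank y = i := by
  have := List.of_mem_filter h
  simpa using this

theorem olBucket_append (i : Int) (xs ys : List String) :
    olBucket i (xs ++ ys) = olBucket i xs ++ olBucket i ys := by
  simp [olBucket]

theorem olBucket_singleton (i : Int) (x : String) :
    olBucket i [x] = if olRank x = i then [x] else [] := by
  simp [olBucket, List.filter_cons]

-- A's loop, characterised: each accumulator collects its bucket
theorem olLoop_eq (xs : List String) (i d u o : List String) :
    xs.foldl olStep (i, d, u, o) =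
      (i ++ olBucket 0 xs, d ++ olBucket 1 xs, u ++ olBucket 2 xs, o ++ olBucket 3 xs) := by
  induction xs generalizing i d u o with
  | nil => simp [olBucket]
  | cons x xs ih =>
    have hb : ∀ j : Int, olBucket j (x :: xs) = olBucket j [x] ++ olBucket j xs := by
      intro j; simpa using olBucket_append j [x] xs
    simp only [List.foldl_cons, olStep]
    split_ifs with h1 h2 h3
    · have hrx : olRank x = 0 := by unfold olRank; rw [if_pos h1]
      rw [ih]; simp [hb, olBucket_singleton, hrx]
    · have hrx : olRank x = 1 := by unfold olRank; rw [if_neg h1, if_pos h2]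
      rw [ih]; simp [hb, olBucket_singleton, hrx]
    · have hrx : olRank x = 2 := by unfold olRank; rw [if_neg h1, if_neg h2, if_pos h3]
      rw [ih]; simp [hb, olBucket_singleton, hrx]
    · have hrx : olRank x = 3 := by unfold olRank; rw [if_neg h1, if_neg h2, if_neg h3]
      rw [ih]; simp [hb, olBucket_singleton, hrx]

-- insertion into l1 ++ l2 lands between them when x goes after all of l1 and before l2's head
theorem insertBy_place (before : String → String → Bool) (x : String) (l1 l2 : List String)
    (h1 : ∀ y ∈ l1, before x y = false)
    (h2 : ∀ z, l2.head? = some z → before x z = true) :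
    PySem.List.insertBy before x (l1 ++ l2) = l1 ++ x :: l2 := by
  induction l1 with
  | nil =>
    cases l2 with
    | nil => rfl
    | cons z t => simp [PySem.List.insertBy, h2 z rfl]
  | cons y ys ih =>
    have hy : before x y = false := h1 y (by simp)
    simp [PySem.List.insertBy, hy]
    exact ih (fun y hy => h1 y (by simp [hy]))

-- the stable sort by rank is exactly the four buckets concatenated
theorem sorted_eq_buckets (xs : List String) :
    PySem.List.sorted xs olRank false =
      olBucket 0 xs ++ olBucket 1 xs ++ olBucket 2 xs ++ olBucket 3 xs := by
  rw [PySem.List.sorted_eq_foldl_insertBy]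
  induction xs using List.reverseRecOn with
  | nil => simp [olBucket]
  | append_singleton xs x ih =>
    rw [List.foldl_append, List.foldl_cons, List.foldl_nil, ih]
    have hb : ∀ j : Int, olBucket j (xs ++ [x]) = olBucket j xs ++ olBucket j [x] := fun j =>
      olBucket_append j xs [x]
    have hrank : ∀ (j : Int) (y : String), y ∈ olBucket j xs → olRank y = j := fun j y =>
      olRank_mem_bucket
    -- place x at the end of its bucket
    have hr03 : olRank x = 0 ∨ olRank x = 1 ∨ olRank x = 2 ∨ olRank x = 3 := by
      unfold olRank; split_ifs <;> simp
    rcases hr03 with hr | hr | hr | hr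
    · -- rank 0: insert at end of bucket 0
      have := insertBy_place (fun a b => decide (olRank a < olRank b)) x
        (olBucket 0 xs) (olBucket 1 xs ++ olBucket 2 xs ++ olBucket 3 xs)
        (by intro y hy; have := hrank 0 y hy; simp [hr, this])
        (by intro z hz
            have hzmem : z ∈ olBucket 1 xs ++ olBucket 2 xs ++ olBucket 3 xs :=
              List.mem_of_mem_head? hz
            have : olRank z = 1 ∨ olRank z = 2 ∨ olRank z = 3 := by
              simp only [List.mem_append] at hzmem
              rcases hzmem with (h | h) | h
              · exact Or.inl (hrank 1 z h)
              · exact Or.inr (Or.inl (hrank 2 z h))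
              · exact Or.inr (Or.inr (hrank 3 z h))
            rcases this with h | h | h <;> simp [hr, h])
      simp only [List.append_assoc] at this ⊢
      rw [this]
      simp [hb, olBucket_singleton, hr]
    · have := insertBy_place (fun a b => decide (olRank a < olRank b)) x
        (olBucket 0 xs ++ olBucket 1 xs) (olBucket 2 xs ++ olBucket 3 xs)
        (by intro y hy
            simp only [List.mem_append] at hy
            rcases hy with h | h
            · have := hrank 0 y h; simp [hr, this]
            · have := hrank 1 y h; simp [hr, this])
        (by intro z hz
            have hzmem : z ∈ olBucket 2 xs ++ olBucket 3 xs := List.mem_of_mem_head? hz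
            have : olRank z = 2 ∨ olRank z = 3 := by
              simp only [List.mem_append] at hzmem
              rcases hzmem with h | h
              · exact Or.inl (hrank 2 z h)
              · exact Or.inr (hrank 3 z h)
            rcases this with h | h <;> simp [hr, h])
      simp only [List.append_assoc] at this ⊢
      rw [this]
      simp [hb, olBucket_singleton, hr]
    · have := insertBy_place (fun a b => decide (olRank a < olRank b)) x
        (olBucket 0 xs ++ olBucket 1 xs ++ olBucket 2 xs) (olBucket 3 xs)
        (by intro y hy
            simp only [List.mem_append] at hy
            rcases hy with (h | h) | h
            · have := hrank 0 y h; simp [hr, this]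
            · have := hrank 1 y h; simp [hr, this]
            · have := hrank 2 y h; simp [hr, this])
        (by intro z hz
            have hzmem : z ∈ olBucket 3 xs := List.mem_of_mem_head? hz
            have := hrank 3 z hzmem
            simp [hr, this])
      simp only [List.append_assoc] at this ⊢
      rw [this]
      simp [hb, olBucket_singleton, hr]
    · have := insertBy_place (fun a b => decide (olRank a < olRank b)) x
        (olBucket 0 xs ++ olBucket 1 xs ++ olBucket 2 xs ++ olBucket 3 xs) []
        (by intro y hy
            simp only [List.mem_append] at hy
            rcases hy with ((h | h) | h) | h
            · have := hrank 0 y h; simp [hr, this]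
            · have := hrank 1 y h; simp [hr, this]
            · have := hrank 2 y h; simp [hr, this]
            · have := hrank 3 y h; simp [hr, this])
        (by intro z hz; simp at hz)
      simp only [List.append_assoc, List.append_nil] at this ⊢
      rw [this]
      simp [hb, olBucket_singleton, hr]

-- ===== VERDICT (by name: the statement is the Claim_ definition above) =====
theorem order_lines_spec : Claim_equal_order_lines := by
  intro xs _
  unfold Spec_order_lines order_lines order_lines_alt
  rw [olLoop_eq xs [] [] [] [], sorted_eq_buckets]
  simp
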